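-- pv_equiv track=rewrite | github.com/alexfrstnberg/Comp_graphics | LR/LR3/barrel.py | cycled_vertices
-- ===== SOURCE A (Python) =====
-- from itertools import cycle
--
-- def cycled_vertices(vertices):
--     duplicated_vertices = [vertex for vertex in vertices for _ in (0, 1)]
--     cycled_vertices = []
--     cycled = cycle(duplicated_vertices)
--     next(cycled)
--     for _ in range(len(duplicated_vertices)):
--         cycled_vertices.append(next(cycled))
--
--     return cycled_vertices
-- ===== SOURCE B (Python) =====
-- def cycled_vertices(vertices):
--     it = iter(vertices)
--     first = next(it)  # StopIteration on empty input, like A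
--     out = []
--     prev = first
--     for v in it:
--         out.append(prev)
--         out.append(v)
--         prev = v
--     out.append(prev)
--     out.append(first)
--     return out
-- ===== Notes on version B (the rewrite author's own statement) =====
-- stated objective: simpler
-- what changed: B emits the flattened consecutive-edge pairs in one pass over the vertices with a prev pointer, instead of building a duplicated list and rotating it through itertools.cycle.
import Mathlib
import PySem

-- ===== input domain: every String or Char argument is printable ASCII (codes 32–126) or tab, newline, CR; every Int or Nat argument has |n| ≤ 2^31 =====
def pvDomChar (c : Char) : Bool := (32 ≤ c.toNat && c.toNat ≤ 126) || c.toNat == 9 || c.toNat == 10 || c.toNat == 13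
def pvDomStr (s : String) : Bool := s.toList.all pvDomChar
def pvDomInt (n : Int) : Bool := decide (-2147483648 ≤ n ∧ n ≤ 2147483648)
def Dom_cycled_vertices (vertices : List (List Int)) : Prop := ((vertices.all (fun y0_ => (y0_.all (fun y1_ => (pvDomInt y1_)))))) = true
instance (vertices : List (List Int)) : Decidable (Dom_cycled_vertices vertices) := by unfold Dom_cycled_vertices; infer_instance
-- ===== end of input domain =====

-- B replaces A's duplicate-then-rotate-via-itertools.cycle with a single prev-pointer pass
-- emitting consecutive-edge pairs directly (objective: simpler).


-- ===== PORT A =====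
-- next(cycled): take from the remaining stream s; when exhausted, wrap around to dup.
-- The [] / [] case is unreachable under Pre_ (Python raises StopIteration there).
def pyCycleLoop (dup : List (List Int)) : Nat → List (List Int) → List (List Int) → List (List Int)
  | 0, _, acc => acc
  | k+1, x :: rest, acc => pyCycleLoop dup k rest (acc ++ [x])
  | k+1, [], acc =>
    match dup with
    | [] => acc
    | x :: rest => pyCycleLoop dup k rest (acc ++ [x])

def cycled_vertices (vertices : List (List Int)) : List (List Int) :=
  let dup := vertices.flatMap (fun v => [v, v])   -- [vertex for vertex in vertices for _ in (0, 1)]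
  match dup with
  | [] => []                                       -- Python: next(cycled) raises StopIteration; excluded by Pre_
  | _hd :: t => pyCycleLoop dup dup.length t []      -- first next() consumed hd; then len(dup) appends

-- ===== PORT B =====
def altLoop (first : List Int) : List Int → List (List Int) → List (List Int)
  | prev, [] => [prev, first]
  | prev, v :: rest => prev :: v :: altLoop first v rest

def cycled_vertices_alt (vertices : List (List Int)) : List (List Int) :=
  match vertices with
  | [] => []                                       -- next(it) raises StopIteration; excluded by Pre_
  | first :: it => altLoop first first it

-- ===== PRECONDITION & SPEC =====
-- Pre_ excludes the empty list, on which both A and B raise StopIteration.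
def Pre_cycled_vertices (vertices : List (List Int)) : Prop := vertices ≠ []
instance (vertices : List (List Int)) : Decidable (Pre_cycled_vertices vertices) := by unfold Pre_cycled_vertices; infer_instance
def pvWitness_cycled_vertices : List (List Int) := [[0, 0], [1, 0], [1, 1]]

def Spec_cycled_vertices (vertices : List (List Int)) (out : List (List Int)) : Prop := out = cycled_vertices_alt vertices
instance (vertices : List (List Int)) (out : List (List Int)) : Decidable (Spec_cycled_vertices vertices out) := by unfold Spec_cycled_vertices; infer_instance

-- ===== CLAIM (what is proved, stated in full; the proofs are below) =====
def Claim_equal_cycled_vertices : Prop := ∀ (vertices : List (List Int)), Dom_cycled_vertices vertices → Pre_cycled_vertices vertices → Spec_cycled_vertices vertices (cycled_vertices vertices)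

-- ===== LEMMAS AND PROOFS =====
-- Running the cycle for s.length + m steps first consumes s entirely.
theorem pyCycleLoop_consume (dup : List (List Int)) (s : List (List Int)) :
    ∀ (m : Nat) (acc : List (List Int)),
      pyCycleLoop dup (s.length + m) s acc = pyCycleLoop dup m [] (acc ++ s) := by
  induction s with
  | nil => intro m acc; simp
  | cons x rest ih =>
    intro m acc
    have h : (x :: rest).length + m = (rest.length + m) + 1 := by simp [List.length_cons]; omega
    rw [h]
    show pyCycleLoop dup (rest.length + m) rest (acc ++ [x]) = _
    rw [ih]
    simp

-- A's rotate-by-one equals t ++ [h] on a nonempty duplicated list.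
theorem portA_rotate (h : List Int) (t : List (List Int)) :
    pyCycleLoop (h :: t) (h :: t).length t [] = t ++ [h] := by
  have : (h :: t).length = t.length + 1 := by simp
  rw [this, pyCycleLoop_consume (h :: t) t 1 []]
  simp [pyCycleLoop]

-- B's loop produces prev :: (duplicated tail) ++ [first].
theorem altLoop_eq (first : List Int) :
    ∀ (rest : List (List Int)) (prev : List Int),
      altLoop first prev rest = prev :: (rest.flatMap (fun v => [v, v])) ++ [first] := by
  intro rest
  induction rest with
  | nil => intro prev; simp [altLoop]
  | cons v r ih => intro prev; simp [altLoop, ih]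

-- ===== VERDICT (by name: the statement is the Claim_ definition above) =====
theorem cycled_vertices_spec : Claim_equal_cycled_vertices := by
  intro vertices _ hpre
  unfold Spec_cycled_vertices
  match vertices with
  | [] => exact absurd rfl hpre
  | f :: rest =>
    show cycled_vertices (f :: rest) = altLoop f f rest
    have hdup : (f :: rest).flatMap (fun v => [v, v]) = f :: f :: rest.flatMap (fun v => [v, v]) := by
      simp [List.flatMap_cons]
    simp only [cycled_vertices, hdup]
    rw [portA_rotate, altLoop_eq]
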